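-- pv_equiv track=rewrite | github.com/vectorgrp/vector-vscode-vcast | python/dataAPIutilities.py | dropTemplates
-- ===== SOURCE A (Python) =====
-- def dropTemplates(originalName):
--     """
--     In some instances, we need to remove all template arguments before doing processing.
--
--     For example, if we have a template that returns a function pointer, then we
--     see `<(*)>` in the template arguments, this means we cannot correctly
--     determine if our mock should return a function pointer or not.
--
--     By dropping all function templates from a given string, we can see if it is
--     only the "return" of a function is a function pointer.
--     """
--     droppedName = ""
--     in_count = 0
--     for idx, char in enumerate(originalName):
--         if char == "<":
--             in_count += 1
--         elif char == ">":
--             in_count -= 1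
--         elif in_count == 0:
--             droppedName += char
--
--     return droppedName
-- ===== SOURCE B (Python) =====
-- def dropTemplates(originalName):
--     # Two-pass: build a delta table and its exclusive prefix sums (depth before
--     # each char), then filter: keep chars that are not brackets and sit at depth 0.
--     deltas = [1 if c == "<" else (-1 if c == ">" else 0) for c in originalName]
--     depths = [0] * len(deltas)
--     running = 0
--     for i, d in enumerate(deltas):
--         depths[i] = running
--         running += d
--     return "".join(c for c, d, dep in zip(originalName, deltas, depths)
--                    if d == 0 and dep == 0)
-- ===== Notes on version B (the rewrite author's own statement) =====
-- stated objective: alternative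
-- what changed: Replaces A's single interleaved scan with mutable depth state by a table-building pass (per-char deltas and exclusive prefix-sum depths) followed by a pure filtering pass over the zipped tables.
import Mathlib
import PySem

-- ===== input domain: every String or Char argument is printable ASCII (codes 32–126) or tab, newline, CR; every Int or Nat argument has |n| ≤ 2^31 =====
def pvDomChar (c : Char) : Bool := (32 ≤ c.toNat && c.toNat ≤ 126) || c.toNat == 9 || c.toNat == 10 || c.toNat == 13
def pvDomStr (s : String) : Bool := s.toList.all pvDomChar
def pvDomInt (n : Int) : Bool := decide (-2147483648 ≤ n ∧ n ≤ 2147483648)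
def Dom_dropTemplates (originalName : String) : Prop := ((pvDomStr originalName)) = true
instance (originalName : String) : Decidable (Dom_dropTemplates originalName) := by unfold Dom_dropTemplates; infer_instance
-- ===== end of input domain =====

-- B replaces A's single stateful scan by a delta/exclusive-prefix-depth table plus a filtering pass (alternative decomposition, same cost class).

-- ===== PORT A =====
-- A's loop: accumulates droppedName and in_count character by character.
def dropTemplatesLoop (cs : List Char) (dropped : List Char) (cnt : Int) : List Char :=
  match cs with
  | [] => dropped
  | c :: rest =>
    if c = '<' then dropTemplatesLoop rest dropped (cnt + 1)
    else if c = '>' then dropTemplatesLoop rest dropped (cnt - 1)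
    else if cnt = 0 then dropTemplatesLoop rest (dropped ++ [c]) cnt
    else dropTemplatesLoop rest dropped cnt

def dropTemplates (originalName : String) : String :=
  String.ofList (dropTemplatesLoop originalName.toList [] 0)

-- ===== PORT B =====
def pvDelta (c : Char) : Int := if c = '<' then 1 else if c = '>' then -1 else 0

def dropTemplates_alt (originalName : String) : String :=
  let cs := originalName.toList
  let deltas := cs.map pvDelta
  let depths := deltas.scanl (· + ·) 0   -- exclusive prefix sums (zip truncates the extra last entry)
  String.ofList (((cs.zip deltas).zip depths).filterMap
    (fun p => if p.1.2 = 0 ∧ p.2 = 0 then some p.1.1 else none))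

-- ===== PRECONDITION & SPEC =====
def Spec_dropTemplates (originalName : String) (out : String) : Prop := out = dropTemplates_alt originalName
instance (originalName : String) (out : String) : Decidable (Spec_dropTemplates originalName out) := by unfold Spec_dropTemplates; infer_instance

-- ===== CLAIM (what is proved, stated in full; the proofs are below) =====
def Claim_equal_dropTemplates : Prop := ∀ (originalName : String), Dom_dropTemplates originalName → Spec_dropTemplates originalName (dropTemplates originalName)

-- ===== LEMMAS AND PROOFS =====
-- Invariant: A's loop with accumulator `dropped` and running count `cnt` equals
-- `dropped` followed by B's tables built with the scanl seeded at `cnt`.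
theorem dropTemplatesLoop_eq (cs : List Char) (dropped : List Char) (cnt : Int) :
    dropTemplatesLoop cs dropped cnt =
      dropped ++ ((cs.zip (cs.map pvDelta)).zip ((cs.map pvDelta).scanl (· + ·) cnt)).filterMap
        (fun p => if p.1.2 = 0 ∧ p.2 = 0 then some p.1.1 else none) := by
  induction cs generalizing dropped cnt with
  | nil => simp [dropTemplatesLoop]
  | cons c rest ih =>
    by_cases h1 : c = '<'
    · simp [dropTemplatesLoop, h1, pvDelta, ih, List.scanl]
    · by_cases h2 : c = '>'
      · simp [dropTemplatesLoop, h2, pvDelta, ih, List.scanl, sub_eq_add_neg]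
      · by_cases h3 : cnt = 0
        · simp [dropTemplatesLoop, h1, h2, h3, pvDelta, ih, List.scanl]
        · simp [dropTemplatesLoop, h1, h2, h3, pvDelta, ih, List.scanl]

-- ===== VERDICT (by name: the statement is the Claim_ definition above) =====
theorem dropTemplates_spec : Claim_equal_dropTemplates := by
  intro s _
  unfold Spec_dropTemplates dropTemplates dropTemplates_alt
  simp [dropTemplatesLoop_eq]
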